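-- pv_equiv track=rewrite | github.com/Seallver/experiment | Project5/sm2.py | _naf_decomposition
-- ===== SOURCE A (Python) =====
-- from typing import Tuple, Optional, List
--
-- def _naf_decomposition(k: int) -> List[int]:
--     naf = []
--     while k > 0:
--         if k % 2 == 1:
--             ki = 2 - (k % 4)
--             k -= ki
--         else:
--             ki = 0
--         naf.append(ki)
--         k //= 2
--     return naf
-- ===== SOURCE B (Python) =====
-- from typing import List
--
--
-- def _naf_decomposition(k: int) -> List[int]:
--     # Non-adjacent form via the classic bit-trick: the NAF digits of k are the
--     # per-position differences of the binary digits of 3k and k, shifted by one.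
--     if k <= 0:
--         return []
--     h = 3 * k
--     return [((h >> i) & 1) - ((k >> i) & 1) for i in range(1, h.bit_length())]
-- ===== Notes on version B (the rewrite author's own statement) =====
-- stated objective: alternative
-- what changed: Replaces the digit-by-digit while-loop (conditional subtract, halve, append) by a closed-form whole-pattern computation: each NAF digit is read off as bit_i(3k) - bit_i(k) over one list comprehension, with no mutation of k.
import Mathlib
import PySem

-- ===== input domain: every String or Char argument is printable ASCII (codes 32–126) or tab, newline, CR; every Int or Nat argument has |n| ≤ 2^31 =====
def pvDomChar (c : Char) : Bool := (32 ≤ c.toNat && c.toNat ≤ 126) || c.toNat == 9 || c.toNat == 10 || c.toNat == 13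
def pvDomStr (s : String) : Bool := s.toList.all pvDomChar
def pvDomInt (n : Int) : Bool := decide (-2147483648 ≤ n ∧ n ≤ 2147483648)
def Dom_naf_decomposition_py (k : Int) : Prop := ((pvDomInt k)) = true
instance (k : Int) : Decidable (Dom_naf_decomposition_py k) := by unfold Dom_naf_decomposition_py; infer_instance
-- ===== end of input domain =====

-- B computes the whole NAF digit pattern in one pass as bit_i(3k) - bit_i(k) instead of A's
-- destructive subtract-and-halve loop; alternative algorithm, same asymptotic cost.

-- ===== PORT A =====
-- while k > 0: peel one NAF digit, then k //= 2
def naf_decomposition_py (k : Int) : List Int :=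
  if h : 0 < k then
    if hodd : PySem.Int.mod k 2 = 1 then
      let ki := 2 - PySem.Int.mod k 4
      ki :: naf_decomposition_py (PySem.Int.floordiv (k - ki) 2)
    else
      0 :: naf_decomposition_py (PySem.Int.floordiv k 2)
  else []
termination_by k.toNat
decreasing_by
  · rw [PySem.Int.mod_eq_emod_of_pos (by norm_num : (0:Int) < 2)] at hodd
    rw [PySem.Int.mod_eq_emod_of_pos (by norm_num : (0:Int) < 4),
        PySem.Int.floordiv_eq_ediv_of_pos (by norm_num : (0:Int) < 2)]
    omega
  · rw [PySem.Int.floordiv_eq_ediv_of_pos (by norm_num : (0:Int) < 2)]; omega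

-- ===== PORT B =====
-- [((h >> i) & 1) - ((k >> i) & 1) for i in range(1, h.bit_length())];
-- range(1, m) over Nat is List.range' 1 (m - 1); shifts exact since i ≥ 0
def naf_decomposition_py_alt (k : Int) : List Int :=
  if k ≤ 0 then []
  else
    let h := 3 * k
    (List.range' 1 (PySem.Int.bitLength h - 1)).map
      (fun (i : Nat) => PySem.Int.band (h >>> i) 1 - PySem.Int.band (k >>> i) 1)

-- ===== PRECONDITION & SPEC =====
def Spec_naf_decomposition_py (k : Int) (out : List Int) : Prop := out = naf_decomposition_py_alt k
instance (k : Int) (out : List Int) : Decidable (Spec_naf_decomposition_py k out) := by unfold Spec_naf_decomposition_py; infer_instance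

-- ===== CLAIM (what is proved, stated in full; the proofs are below) =====
def Claim_equal_naf_decomposition_py : Prop := ∀ (k : Int), Dom_naf_decomposition_py k → Spec_naf_decomposition_py k (naf_decomposition_py k)

-- ===== LEMMAS AND PROOFS =====

-- A's loop restated over Nat
def loopN (n : Nat) : List Int :=
  if n = 0 then []
  else if n % 4 = 1 then 1 :: loopN (n / 2)
  else if n % 4 = 3 then (-1) :: loopN ((n + 1) / 2)
  else 0 :: loopN (n / 2)
termination_by n
decreasing_by all_goals omega

-- bit i of x, and B's digit formula over Nat
def bitn (x i : Nat) : Nat := x / 2 ^ i % 2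
def fB (n i : Nat) : Int := (bitn (3 * n) i : Int) - (bitn n i : Int)
def mapB (n : Nat) : List Int := (List.range' 1 (Nat.log2 (3 * n))).map (fB n)

theorem bitn_half (x i : Nat) : bitn x (i + 1) = bitn (x / 2) i := by
  simp only [bitn]
  rw [Nat.div_div_eq_div_mul]
  congr 2
  ring

theorem bitn_one (x y t : Nat) (h : x / 2 = y) : bitn x (1 + t) = bitn y t := by
  rw [show 1 + t = t + 1 by omega, bitn_half, h]

theorem bitn_one' (x y : Nat) (h : x / 2 = y) : bitn x 1 = bitn y 0 := by
  rw [show (1 : Nat) = 0 + 1 from rfl, bitn_half, h]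

theorem bitn_two (x y t : Nat) (h : x / 2 / 2 = y) : bitn x (2 + t) = bitn y t := by
  rw [show 2 + t = (t + 1) + 1 by omega, bitn_half, bitn_half, h]

theorem bitInt_eq (x t : Nat) :
    (bitn x t : Int) = (x / 2 ^ t : Nat) - 2 * ((x / 2 ^ (t + 1) : Nat) : Int) := by
  have h1 : x / 2 ^ (t + 1) = x / 2 ^ t / 2 := by
    rw [pow_succ, ← Nat.div_div_eq_div_mul]
  have h2 := Nat.div_add_mod (x / 2 ^ t) 2
  simp only [bitn, h1]
  push_cast
  omega

-- the borrow-transport identity behind the k%4==3 step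
theorem key_digit (j t : Nat) :
    (bitn (3 * j + 2) t : Int) - (bitn j t : Int)
      = (bitn (3 * j + 3) t : Int) - (bitn (j + 1) t : Int) := by
  have hdvd : ∀ s : Nat, (2 ^ s ∣ 3 * j + 3) ↔ (2 ^ s ∣ j + 1) := by
    intro s
    constructor
    · intro h
      have hc : Nat.Coprime (2 ^ s) 3 := Nat.Coprime.pow_left s (by decide)
      have : 3 * j + 3 = 3 * (j + 1) := by ring
      rw [this] at h
      exact hc.dvd_of_dvd_mul_left h
    · intro h
      have : 3 * j + 3 = 3 * (j + 1) := by ring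
      rw [this]
      exact Dvd.dvd.mul_left h 3
  have hs : ∀ s : Nat, (3 * j + 3) / 2 ^ s = (3 * j + 2) / 2 ^ s + (if 2 ^ s ∣ j + 1 then 1 else 0)
      ∧ (j + 1) / 2 ^ s = j / 2 ^ s + (if 2 ^ s ∣ j + 1 then 1 else 0) := by
    intro s
    constructor
    · have h0 : (3 * j + 2 + 1) / 2 ^ s = (3 * j + 2) / 2 ^ s + if 2 ^ s ∣ 3 * j + 2 + 1 then 1 else 0 := by
        rw [Nat.succ_div]
      rw [show 3 * j + 2 + 1 = 3 * j + 3 by ring] at h0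
      rw [h0]
      simp only [hdvd s]
    · have h0 : (j + 1) / 2 ^ s = j / 2 ^ s + if 2 ^ s ∣ j + 1 then 1 else 0 := by
        rw [Nat.succ_div]
      rw [h0]
  rw [bitInt_eq, bitInt_eq, bitInt_eq, bitInt_eq,
      (hs t).1, (hs t).2, (hs (t + 1)).1, (hs (t + 1)).2]
  push_cast
  split_ifs <;> ring

-- log2 facts
theorem log2_eq_of {L n : Nat} (h1 : 2 ^ L ≤ n) (h2 : n < 2 ^ (L + 1)) : Nat.log2 n = L := by
  rw [Nat.log2_eq_log_two]
  exact Nat.log_eq_of_pow_le_of_lt_pow h1 h2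

theorem log2_bounds {n : Nat} (hn : 0 < n) :
    2 ^ Nat.log2 n ≤ n ∧ n < 2 ^ (Nat.log2 n + 1) := by
  rw [Nat.log2_eq_log_two]
  exact ⟨Nat.pow_log_le_self 2 (by omega), Nat.lt_pow_succ_log_self (by norm_num) n⟩

theorem log2_half {n : Nat} (hn : 2 ≤ n) : Nat.log2 n = Nat.log2 (n / 2) + 1 := by
  have h1 : Nat.log2 (n / 2) = Nat.log2 n - 1 := by
    rw [Nat.log2_eq_log_two, Nat.log2_eq_log_two, Nat.log_div_base]
  have h2 : 0 < Nat.log2 n := by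
    rw [Nat.log2_eq_log_two]
    exact Nat.log_pos (by norm_num) hn
  omega

theorem log2_two_mul {m : Nat} (hm : 0 < m) : Nat.log2 (2 * m) = Nat.log2 m + 1 := by
  rw [log2_half (by omega)]
  have h : 2 * m / 2 = m := by omega
  rw [h]

theorem log2_even_succ {m : Nat} (hm : 0 < m) : Nat.log2 (2 * m + 1) = Nat.log2 (2 * m) := by
  obtain ⟨h1, h2⟩ := log2_bounds (n := 2 * m) (by omega)
  refine log2_eq_of ?_ ?_
  · omega
  · have hev : 2 ^ (Nat.log2 (2 * m) + 1) = 2 * 2 ^ Nat.log2 (2 * m) := by ring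
    omega

theorem not_pow_two_eq_mul_three (L c : Nat) : 2 ^ L ≠ 3 * c := by
  intro h
  have h3 : (3 : Nat) ∣ 2 ^ L := ⟨c, h⟩
  have := (Nat.prime_three).dvd_of_dvd_pow (n := L) (by simpa using h3)
  omega

theorem log2_6j4_eq {j : Nat} : Nat.log2 (6 * j + 4) = Nat.log2 (6 * j + 6) := by
  obtain ⟨h1, h2⟩ := log2_bounds (n := 6 * j + 6) (by omega)
  refine log2_eq_of ?_ (by omega)
  by_contra hlt
  push_neg at hlt
  -- 6j+4 < 2^L ≤ 6j+6, so 2^L is 6j+5 (odd, impossible) or 6j+6 (divisible by 3, impossible)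
  have hcase : 2 ^ Nat.log2 (6 * j + 6) = 6 * j + 5 ∨ 2 ^ Nat.log2 (6 * j + 6) = 6 * j + 6 := by
    omega
  rcases hcase with h | h
  · rcases Nat.eq_zero_or_pos (Nat.log2 (6 * j + 6)) with h0 | h0
    · rw [h0] at h
      norm_num at h
    · have h5 : 2 ∣ 2 ^ Nat.log2 (6 * j + 6) := dvd_pow_self 2 (by omega)
      omega
  · exact not_pow_two_eq_mul_three (Nat.log2 (6 * j + 6)) (2 * j + 2) (by omega)

-- port A agrees with loopN on casts
theorem portA_eq_loopN (n : Nat) : naf_decomposition_py (n : Int) = loopN n := by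
  induction n using Nat.strong_induction_on with
  | _ n ih =>
    by_cases h0 : n = 0
    · subst h0
      rw [naf_decomposition_py, loopN]
      norm_num
    have hpos : 0 < (n : Int) := by exact_mod_cast Nat.pos_of_ne_zero h0
    have hmod2 : PySem.Int.mod (n : Int) 2 = ((n % 2 : Nat) : Int) := by
      exact_mod_cast PySem.Int.mod_natCast n 2
    have hmod4 : PySem.Int.mod (n : Int) 4 = ((n % 4 : Nat) : Int) := by
      exact_mod_cast PySem.Int.mod_natCast n 4
    rw [naf_decomposition_py, dif_pos hpos]
    by_cases h1 : n % 4 = 1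
    · have hm2 : PySem.Int.mod (n : Int) 2 = 1 := by rw [hmod2]; norm_cast; omega
      rw [dif_pos hm2]
      show (2 - PySem.Int.mod (n : Int) 4)
            :: naf_decomposition_py
                (PySem.Int.floordiv ((n : Int) - (2 - PySem.Int.mod (n : Int) 4)) 2)
          = loopN n
      have hki : (2 : Int) - PySem.Int.mod (n : Int) 4 = 1 := by rw [hmod4, h1]; norm_num
      rw [hki]
      have harg : (n : Int) - 1 = ((n - 1 : Nat) : Int) := by omega
      have hfd : PySem.Int.floordiv ((n - 1 : Nat) : Int) 2 = (((n - 1) / 2 : Nat) : Int) := by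
        exact_mod_cast PySem.Int.floordiv_natCast (n - 1) 2
      rw [harg, hfd, ih ((n - 1) / 2) (by omega)]
      conv_rhs => rw [loopN]
      rw [if_neg h0, if_pos h1]
      have : (n - 1) / 2 = n / 2 := by omega
      rw [this]
    by_cases h3 : n % 4 = 3
    · have hm2 : PySem.Int.mod (n : Int) 2 = 1 := by rw [hmod2]; norm_cast; omega
      rw [dif_pos hm2]
      show (2 - PySem.Int.mod (n : Int) 4)
            :: naf_decomposition_py
                (PySem.Int.floordiv ((n : Int) - (2 - PySem.Int.mod (n : Int) 4)) 2)
          = loopN n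
      have hki : (2 : Int) - PySem.Int.mod (n : Int) 4 = -1 := by rw [hmod4, h3]; norm_num
      rw [hki]
      have harg : (n : Int) - (-1) = ((n + 1 : Nat) : Int) := by omega
      have hfd : PySem.Int.floordiv ((n + 1 : Nat) : Int) 2 = (((n + 1) / 2 : Nat) : Int) := by
        exact_mod_cast PySem.Int.floordiv_natCast (n + 1) 2
      rw [harg, hfd, ih ((n + 1) / 2) (by omega)]
      conv_rhs => rw [loopN]
      rw [if_neg h0, if_neg h1, if_pos h3]
    · have hm2 : ¬ PySem.Int.mod (n : Int) 2 = 1 := by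
        rw [hmod2]
        have : n % 2 = 0 := by omega
        rw [this]
        norm_num
      rw [dif_neg hm2]
      have hfd : PySem.Int.floordiv (n : Int) 2 = ((n / 2 : Nat) : Int) := by
        exact_mod_cast PySem.Int.floordiv_natCast n 2
      rw [hfd, ih (n / 2) (by omega)]
      conv_rhs => rw [loopN]
      rw [if_neg h0, if_neg h1, if_neg h3]

-- Python bit_length = log2 + 1 on positives
theorem bitLength_eq_log2 (m : Nat) (hm : 0 < m) :
    PySem.Int.bitLength (m : Int) = Nat.log2 m + 1 := by
  induction m using Nat.strong_induction_on with
  | _ m ih =>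
    rw [PySem.Int.bitLength_natCast hm]
    by_cases h1 : m = 1
    · subst h1
      have hl : Nat.log2 1 = 0 := log2_eq_of (by norm_num) (by norm_num)
      rw [hl]
      norm_num [PySem.Int.bitLength_zero]
    · have h2 : 2 ≤ m := by omega
      rw [ih (m / 2) (by omega) (by omega), log2_half h2]

-- port B agrees with mapB on positive casts
theorem portB_eq_mapB (n : Nat) (hn : 0 < n) : naf_decomposition_py_alt (n : Int) = mapB n := by
  rw [naf_decomposition_py_alt]
  rw [if_neg (by exact_mod_cast Nat.not_le.mpr hn)]
  have h3 : (3 : Int) * (n : Int) = ((3 * n : Nat) : Int) := by push_cast; ring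
  simp only [h3]
  rw [bitLength_eq_log2 (3 * n) (by omega)]
  simp only [Nat.add_sub_cancel, mapB]
  apply List.map_congr_left
  intro i _
  have hsh : ∀ x : Nat, ((x : Int) >>> i) = ((x >>> i : Nat) : Int) := fun x => rfl
  have hb : ∀ x : Nat, PySem.Int.band ((x : Nat) : Int) 1 = ((x % 2 : Nat) : Int) := by
    intro x
    rw [PySem.Int.band_one]
    exact_mod_cast PySem.Int.mod_natCast x 2
  rw [hsh, hsh, hb, hb]
  simp [fB, bitn, Nat.shiftRight_eq_div_pow]

-- loopN equals the digit formula: the heart of the equivalence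
theorem loopN_eq_mapB (n : Nat) (hn : 0 < n) : loopN n = mapB n := by
  induction n using Nat.strong_induction_on with
  | _ n ih =>
    by_cases he : n % 2 = 0
    · -- n = 2m even
      obtain ⟨m, rfl⟩ : ∃ m, n = 2 * m := ⟨n / 2, by omega⟩
      have hm : 0 < m := by omega
      rw [loopN, if_neg (by omega), if_neg (by omega), if_neg (by omega)]
      have hdiv : 2 * m / 2 = m := by omega
      rw [hdiv, ih m (by omega) hm]
      simp only [mapB]
      rw [show 3 * (2 * m) = 2 * (3 * m) from by ring, log2_two_mul (by omega),
          List.range'_succ, List.map_cons]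
      congr 1
      · simp only [fB]
        rw [bitn_one' (3 * (2 * m)) (3 * m) (by omega), bitn_one' (2 * m) m (by omega)]
        simp only [bitn, pow_zero, Nat.div_one]
        have h32 : 3 * m % 2 = m % 2 := by omega
        rw [h32]
        ring
      · rw [List.range'_eq_map_range, List.range'_eq_map_range, List.map_map, List.map_map]
        apply List.map_congr_left
        intro t _
        simp only [Function.comp_apply, fB]
        simp only [show (1 : Nat) + 1 = 2 from rfl]
        rw [bitn_one (3 * m) (3 * m / 2) t rfl, bitn_one m (m / 2) t rfl,
            bitn_two (3 * (2 * m)) (3 * m / 2) t (by omega),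
            bitn_two (2 * m) (m / 2) t (by omega)]
    by_cases h1 : n % 4 = 1
    · by_cases hone : n = 1
      · subst hone
        rw [loopN, if_neg (by omega), if_pos (by omega)]
        have h0 : loopN 0 = [] := by
          rw [loopN]
          norm_num
        have hl : Nat.log2 3 = 1 := log2_eq_of (by norm_num) (by norm_num)
        rw [show (1 : Nat) / 2 = 0 from rfl, h0]
        simp only [mapB]
        rw [show 3 * 1 = 3 from rfl, hl, show List.range' 1 1 = [1] from rfl,
            List.map_cons, List.map_nil]
        simp [fB, bitn]
      · -- n = 4j+1, j ≥ 1
        obtain ⟨j, rfl⟩ : ∃ j, n = 4 * j + 1 := ⟨n / 4, by omega⟩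
        have hj : 0 < j := by omega
        rw [loopN, if_neg (by omega), if_pos (by omega)]
        have hdiv : (4 * j + 1) / 2 = 2 * j := by omega
        rw [hdiv, ih (2 * j) (by omega) (by omega)]
        have hlen : Nat.log2 (3 * (4 * j + 1)) = Nat.log2 (3 * (2 * j)) + 1 := by
          have e1 : 3 * (4 * j + 1) = 12 * j + 3 := by ring
          have e2 : 3 * (2 * j) = 2 * (3 * j) := by ring
          rw [e1, e2, log2_half (by omega)]
          have e3 : (12 * j + 3) / 2 = 2 * (3 * j) + 1 := by omega
          rw [e3, log2_even_succ (by omega)]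
        simp only [mapB]
        rw [hlen, List.range'_succ, List.map_cons]
        congr 1
        · simp only [fB]
          rw [bitn_one' (3 * (4 * j + 1)) (6 * j + 1) (by omega),
              bitn_one' (4 * j + 1) (2 * j) (by omega)]
          simp only [bitn, pow_zero, Nat.div_one]
          have m1 : (6 * j + 1) % 2 = 1 := by omega
          have m2 : 2 * j % 2 = 0 := by omega
          rw [m1, m2]
          norm_num
        · rw [List.range'_eq_map_range, List.range'_eq_map_range, List.map_map, List.map_map]
          apply List.map_congr_left
          intro t _
          simp only [Function.comp_apply, fB]
          simp only [show (1 : Nat) + 1 = 2 from rfl]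
          rw [bitn_one (3 * (2 * j)) (3 * j) t (by omega), bitn_one (2 * j) j t (by omega),
              bitn_two (3 * (4 * j + 1)) (3 * j) t (by omega),
              bitn_two (4 * j + 1) j t (by omega)]
    · -- n = 4j+3
      have h3 : n % 4 = 3 := by omega
      obtain ⟨j, rfl⟩ : ∃ j, n = 4 * j + 3 := ⟨n / 4, by omega⟩
      rw [loopN, if_neg (by omega), if_neg (by omega), if_pos (by omega)]
      have hdiv : (4 * j + 3 + 1) / 2 = 2 * j + 2 := by omega
      rw [hdiv, ih (2 * j + 2) (by omega) (by omega)]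
      have hlen : Nat.log2 (3 * (4 * j + 3)) = Nat.log2 (3 * (2 * j + 2)) + 1 := by
        have e1 : 3 * (4 * j + 3) = 12 * j + 9 := by ring
        have e2 : 3 * (2 * j + 2) = 6 * j + 6 := by ring
        rw [e1, e2, log2_half (by omega)]
        have e3 : (12 * j + 9) / 2 = 6 * j + 4 := by omega
        rw [e3, log2_6j4_eq]
      simp only [mapB]
      rw [hlen, List.range'_succ, List.map_cons]
      congr 1
      · simp only [fB]
        rw [bitn_one' (3 * (4 * j + 3)) (6 * j + 4) (by omega),
            bitn_one' (4 * j + 3) (2 * j + 1) (by omega)]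
        simp only [bitn, pow_zero, Nat.div_one]
        have m1 : (6 * j + 4) % 2 = 0 := by omega
        have m2 : (2 * j + 1) % 2 = 1 := by omega
        rw [m1, m2]
        norm_num
      · rw [List.range'_eq_map_range, List.range'_eq_map_range, List.map_map, List.map_map]
        apply List.map_congr_left
        intro t _
        simp only [Function.comp_apply, fB]
        simp only [show (1 : Nat) + 1 = 2 from rfl]
        rw [bitn_one (3 * (2 * j + 2)) (3 * j + 3) t (by omega),
            bitn_one (2 * j + 2) (j + 1) t (by omega),
            bitn_two (3 * (4 * j + 3)) (3 * j + 2) t (by omega),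
            bitn_two (4 * j + 3) j t (by omega)]
        exact (key_digit j t).symm

-- ===== VERDICT (by name: the statement is the Claim_ definition above) =====
theorem naf_decomposition_py_spec : Claim_equal_naf_decomposition_py := by
  intro k _
  unfold Spec_naf_decomposition_py
  by_cases hk : k ≤ 0
  · rw [naf_decomposition_py, naf_decomposition_py_alt, dif_neg (by omega), if_pos hk]
  · push_neg at hk
    have hk' : k = ((k.toNat : Nat) : Int) := by omega
    rw [hk', portA_eq_loopN, portB_eq_mapB _ (by omega), loopN_eq_mapB _ (by omega)]
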